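-- pv_equiv track=rewrite | github.com/seiichikick0404/coding-problems | practice/C - Many Balls.py | check
-- ===== SOURCE A (Python) =====
-- def check(ans):
--     curr = 0
--     for s in ans:
--         if s == "A":
--             curr += 1
--         else:
--             curr *= 2
--
--     return curr
-- ===== SOURCE B (Python) =====
-- def check(ans):
--     # Right-to-left distributive expansion: each 'A' contributes a power of two
--     # equal to the number of doublings that follow it.
--     result = 0
--     mult = 1
--     for s in reversed(list(ans)):
--         if s == "A":
--             result += mult
--         else:
--             mult *= 2
--     return result
-- ===== Notes on version B (the rewrite author's own statement) =====
-- stated objective: alternative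
-- what changed: Replaces the forward accumulator that is incremented/doubled with a right-to-left pass maintaining a power-of-two multiplier and summing each A's contribution.
import Mathlib
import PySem

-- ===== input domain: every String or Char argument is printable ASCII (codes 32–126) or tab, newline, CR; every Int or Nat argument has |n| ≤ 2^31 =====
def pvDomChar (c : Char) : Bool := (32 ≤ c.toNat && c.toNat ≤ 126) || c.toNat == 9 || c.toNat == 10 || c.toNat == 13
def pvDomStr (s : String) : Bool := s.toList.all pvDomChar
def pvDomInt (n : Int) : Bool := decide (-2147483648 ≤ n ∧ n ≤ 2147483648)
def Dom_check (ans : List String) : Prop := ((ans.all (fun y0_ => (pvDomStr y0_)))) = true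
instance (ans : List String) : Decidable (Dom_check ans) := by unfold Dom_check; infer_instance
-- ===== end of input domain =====

-- ===== PORT A =====
def check (ans : List String) : Int :=
  ans.foldl (fun curr s => if s == "A" then curr + 1 else curr * 2) 0

-- ===== PORT B =====
-- B: right-to-left pass keeping (result, mult); each "A" adds the current power-of-two multiplier.
def check_alt (ans : List String) : Int :=
  (ans.foldr (fun s (rm : Int × Int) => if s == "A" then (rm.1 + rm.2, rm.2) else (rm.1, rm.2 * 2)) (0, 1)).1

-- ===== PRECONDITION & SPEC =====
def Spec_check (ans : List String) (out : Int) : Prop := out = check_alt ans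
instance (ans : List String) (out : Int) : Decidable (Spec_check ans out) := by unfold Spec_check; infer_instance

-- ===== CLAIM (what is proved, stated in full; the proofs are below) =====
def Claim_equal_check : Prop := ∀ (ans : List String), Dom_check ans → Spec_check ans (check ans)

-- ===== LEMMAS AND PROOFS =====

lemma check_fold_eq (ans : List String) (c : Int) :
    ans.foldl (fun curr s => if s == "A" then curr + 1 else curr * 2) c =
      c * (ans.foldr (fun s (rm : Int × Int) => if s == "A" then (rm.1 + rm.2, rm.2) else (rm.1, rm.2 * 2)) (0, 1)).2
        + (ans.foldr (fun s (rm : Int × Int) => if s == "A" then (rm.1 + rm.2, rm.2) else (rm.1, rm.2 * 2)) (0, 1)).1 := by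
  induction ans generalizing c with
  | nil => simp
  | cons s t ih =>
    simp only [List.foldl_cons, List.foldr_cons]
    rw [ih]
    by_cases h : s == "A" <;> simp [h] <;> ring

-- ===== VERDICT (by name: the statement is the Claim_ definition above) =====
theorem check_spec : Claim_equal_check := by
  intro ans _
  unfold Spec_check check check_alt
  rw [check_fold_eq]
  ring
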